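-- pv_equiv track=rewrite | github.com/ProteinEngineering-PESB2/hfbs-class-models | source_code/process_input_sequences/process_hydrophobin.py | countNumberCysCys
-- ===== SOURCE A (Python) =====
-- def countNumberCysCys(sequence):
--
--     contCysCys = 0
--
--     for i in range(len(sequence)-1):
--         if sequence[i] == 'C' and sequence[i+1] == 'C':
--             contCysCys+=1
--     if contCysCys>=2:#cumple con el minimo
--         return 0
--     else:#no lo cumple
--         return 1
-- ===== SOURCE B (Python) =====
-- def countNumberCysCys(sequence):
--     total = 0
--     run = 0
--     for ch in sequence:
--         if ch == 'C':
--             run += 1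
--         else:
--             if run > 1:
--                 total += run - 1
--             run = 0
--     if run > 1:
--         total += run - 1
--     return 0 if total >= 2 else 1
-- ===== Notes on version B (the rewrite author's own statement) =====
-- stated objective: alternative
-- what changed: Replaces the indexed scan over all adjacent positions with a single run-length pass: B tracks the length of the current maximal run of 'C's and, when a run ends, adds run-1 overlapping CC pairs to the total.
import Mathlib
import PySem

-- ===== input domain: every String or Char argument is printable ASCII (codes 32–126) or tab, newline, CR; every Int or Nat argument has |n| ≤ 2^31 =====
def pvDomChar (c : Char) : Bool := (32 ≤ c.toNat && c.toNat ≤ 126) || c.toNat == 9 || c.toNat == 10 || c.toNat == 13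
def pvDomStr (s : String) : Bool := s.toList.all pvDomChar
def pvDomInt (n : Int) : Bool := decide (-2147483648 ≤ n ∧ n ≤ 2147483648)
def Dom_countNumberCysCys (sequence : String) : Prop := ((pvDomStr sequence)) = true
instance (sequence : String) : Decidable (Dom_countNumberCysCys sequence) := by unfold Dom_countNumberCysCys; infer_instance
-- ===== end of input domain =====

-- B replaces A's adjacent-index scan with a single run-length pass over the characters (alternative decomposition, same cost).

-- ===== PORT A =====
-- for i in range(len(sequence)-1): if sequence[i]=='C' and sequence[i+1]=='C': contCysCys += 1
def countNumberCysCys (sequence : String) : Int :=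
  let contCysCys : Int :=
    (PySem.List.pyRange 0 (PySem.Str.len sequence - 1) 1).foldl
      (fun acc i =>
        if PySem.Str.pyGet? sequence i = some 'C' ∧ PySem.Str.pyGet? sequence (i + 1) = some 'C'
        then acc + 1 else acc) 0
  if contCysCys ≥ 2 then 0 else 1

-- ===== PORT B =====
-- the (total, run) loop of Source B: run counts the current maximal run of 'C's,
-- a run of length r contributes r-1 overlapping CC pairs when it ends
def cysRunLoop : List Char → Int → Int → Int
  | [], total, run => if run > 1 then total + (run - 1) else total
  | c :: t, total, run =>
      if c = 'C' then cysRunLoop t total (run + 1)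
      else cysRunLoop t (if run > 1 then total + (run - 1) else total) 0

def countNumberCysCys_alt (sequence : String) : Int :=
  let total := cysRunLoop sequence.toList 0 0
  if total ≥ 2 then 0 else 1

-- ===== PRECONDITION & SPEC =====
def Spec_countNumberCysCys (sequence : String) (out : Int) : Prop := out = countNumberCysCys_alt sequence
instance (sequence : String) (out : Int) : Decidable (Spec_countNumberCysCys sequence out) := by unfold Spec_countNumberCysCys; infer_instance

-- ===== CLAIM (what is proved, stated in full; the proofs are below) =====
def Claim_equal_countNumberCysCys : Prop := ∀ (sequence : String), Dom_countNumberCysCys sequence → Spec_countNumberCysCys sequence (countNumberCysCys sequence)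

-- ===== LEMMAS AND PROOFS =====

-- number of overlapping adjacent CC pairs, the common characterisation of both ports
def ccPairs : List Char → Int
  | a :: b :: t => (if a = 'C' ∧ b = 'C' then 1 else 0) + ccPairs (b :: t)
  | _ => 0

theorem countA_eq_ccPairs (l : List Char) (acc : Int) :
    (List.range (l.length - 1)).foldl
      (fun acc k => if l[k]? = some 'C' ∧ l[k+1]? = some 'C' then acc + 1 else acc) acc
    = acc + ccPairs l := by
  induction l generalizing acc with
  | nil => simp [ccPairs]
  | cons a t ih =>
    cases t with
    | nil => simp [ccPairs]
    | cons b t' =>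
      have h := ih (if a = 'C' ∧ b = 'C' then acc + 1 else acc)
      simp only [List.getElem?_cons_succ, List.length_cons, Nat.add_sub_cancel] at h ⊢
      rw [List.range_succ_eq_map, List.foldl_cons, List.foldl_map]
      simp only [List.getElem?_cons_succ, List.getElem?_cons_zero, Option.some_inj] at *
      exact h.trans (by rw [ccPairs]; split <;> ring)

theorem ccPairs_replicate (n : Nat) :
    ccPairs (List.replicate n 'C') = if (1 : Int) < n then (n : Int) - 1 else 0 := by
  induction n with
  | zero => simp [ccPairs]
  | succ m ih =>
    cases m with
    | zero => simp [ccPairs]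
    | succ k =>
      rw [List.replicate_succ, List.replicate_succ, ccPairs, ← List.replicate_succ]
      rw [ih]
      push_cast
      split <;> split <;> simp_all <;> omega

theorem ccPairs_rep_append (n : Nat) (c : Char) (t : List Char) (hc : ¬ c = 'C') :
    ccPairs (List.replicate n 'C' ++ c :: t)
    = ccPairs (List.replicate n 'C') + ccPairs (c :: t) := by
  induction n with
  | zero => simp [ccPairs]
  | succ m ih =>
    cases m with
    | zero => simp [ccPairs, hc]
    | succ k =>
      rw [List.replicate_succ, List.replicate_succ, List.cons_append, List.cons_append,
          ccPairs, ← List.cons_append, ← List.replicate_succ, ih,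
          List.replicate_succ, ccPairs, ← List.replicate_succ]
      simp
      ring

theorem ccPairs_cons_of_ne (c : Char) (t : List Char) (hc : ¬ c = 'C') :
    ccPairs (c :: t) = ccPairs t := by
  cases t with
  | nil => simp [ccPairs]
  | cons b t' => rw [ccPairs]; simp [hc]

theorem cysRunLoop_eq (l : List Char) (total : Int) (n : Nat) :
    cysRunLoop l total (n : Int) = total + ccPairs (List.replicate n 'C' ++ l) := by
  induction l generalizing total n with
  | nil =>
    rw [cysRunLoop, List.append_nil, ccPairs_replicate]
    split <;> omega
  | cons c t ih =>
    rw [cysRunLoop]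
    by_cases hc : c = 'C'
    · subst hc
      simp only [if_pos]
      have : ((n : Int) + 1) = ((n + 1 : Nat) : Int) := by push_cast; ring
      rw [this, ih]
      rw [List.replicate_succ']
      simp
    · rw [if_neg hc]
      have h0 : ((0 : Nat) : Int) = 0 := rfl
      rw [← h0, ih]
      rw [ccPairs_rep_append _ _ _ hc, ccPairs_replicate, ccPairs_cons_of_ne _ _ hc]
      simp [List.replicate]
      split <;> omega

theorem ports_agree (s : String) : countNumberCysCys s = countNumberCysCys_alt s := by
  unfold countNumberCysCys countNumberCysCys_alt
  have hB : cysRunLoop s.toList 0 0 = ccPairs s.toList := by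
    have := cysRunLoop_eq s.toList 0 0
    simpa using this
  have hA : (PySem.List.pyRange 0 (PySem.Str.len s - 1) 1).foldl
      (fun acc i =>
        if PySem.Str.pyGet? s i = some 'C' ∧ PySem.Str.pyGet? s (i + 1) = some 'C'
        then acc + 1 else acc) 0 = ccPairs s.toList := by
    rw [PySem.List.pyRange_one, List.foldl_map]
    have hcast : ∀ (k : Nat), ((0 : Int) + (k : Int)) = (k : Int) := by intro k; ring
    simp only [hcast]
    have hstep : ∀ (acc : Int) (k : Nat),
        (if PySem.Str.pyGet? s (k : Int) = some 'C' ∧ PySem.Str.pyGet? s ((k : Int) + 1) = some 'C'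
         then acc + 1 else acc)
        = (if s.toList[k]? = some 'C' ∧ s.toList[k+1]? = some 'C' then acc + 1 else acc) := by
      intro acc k
      have h1 : ((k : Int) + 1) = ((k + 1 : Nat) : Int) := by push_cast; ring
      rw [h1, PySem.Str.pyGet?_natCast, PySem.Str.pyGet?_natCast]
    simp only [hstep]
    have hlen : ((PySem.Str.len s - 1) - 0).toNat = s.toList.length - 1 := by
      simp [PySem.Str.len]
    rw [hlen, countA_eq_ccPairs]
    ring
  rw [hA, hB]

-- ===== VERDICT (by name: the statement is the Claim_ definition above) =====
theorem countNumberCysCys_spec : Claim_equal_countNumberCysCys := by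
  intro s _
  unfold Spec_countNumberCysCys
  exact ports_agree s
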